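-- pv_equiv track=rewrite | github.com/AbhijithRaghavKc/assigment | utils/data_loader.py | create_sample_dataset
-- ===== SOURCE A (Python) =====
-- from typing import List, Dict, Any, Union
--
-- def create_sample_dataset(size: int = 1000, theme: str = "technology") -> List[str]:
--     """
--     Generate a sample dataset of specified size and theme
--     """
--     base_texts = {
--         "technology": [
--             "Artificial intelligence is transforming industries across the globe with machine learning algorithms",
--             "Cloud computing platforms provide scalable infrastructure for modern applications and services",
--             "Data science and analytics help organizations make informed decisions based on empirical evidence",
--             "Cybersecurity measures are essential to protect sensitive information from malicious attacks",
--             "Internet of Things devices are creating interconnected ecosystems of smart technology",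
--             "Blockchain technology offers decentralized solutions for secure and transparent transactions",
--             "Quantum computing promises to solve complex problems that are intractable for classical computers",
--             "Virtual reality and augmented reality are changing how we interact with digital content",
--             "5G networks enable faster communication and support for next-generation mobile applications",
--             "Edge computing brings processing power closer to data sources for reduced latency"
--         ],
--         "business": [
--             "Strategic planning involves setting long-term goals and developing actionable implementation strategies",
--             "Market research provides valuable insights into customer preferences and competitive landscapes",
--             "Financial analysis helps organizations optimize resource allocation and improve profitability",
--             "Supply chain management ensures efficient flow of goods from suppliers to customers",
--             "Human resources development focuses on talent acquisition and employee engagement strategies",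
--             "Digital transformation initiatives modernize business processes using advanced technologies",
--             "Customer relationship management systems improve service quality and retention rates",
--             "Project management methodologies ensure timely delivery of objectives within budget constraints",
--             "Risk assessment procedures identify potential threats and develop mitigation strategies",
--             "Performance metrics and key performance indicators measure organizational success"
--         ]
--     }
--
--     theme_texts = base_texts.get(theme, base_texts["technology"])
--     generated_texts = []
--
--     for i in range(size):
--         # Select base text and add variations
--         base_text = theme_texts[i % len(theme_texts)]
--
--         # Add some variation
--         variations = [
--             f"In today's world, {base_text.lower()}",
--             f"Research shows that {base_text.lower()}",
--             f"Many experts believe that {base_text.lower()}",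
--             f"Studies indicate that {base_text.lower()}",
--             f"It is widely recognized that {base_text.lower()}",
--             base_text,
--             f"According to recent findings, {base_text.lower()}",
--             f"The latest developments show that {base_text.lower()}"
--         ]
--
--         selected_text = variations[i % len(variations)]
--         generated_texts.append(selected_text)
--
--     return generated_texts
-- ===== SOURCE B (Python) =====
-- from typing import List
--
--
-- def create_sample_dataset(size: int = 1000, theme: str = "technology") -> List[str]:
--     """
--     Generate a sample dataset of specified size and theme.
--
--     The output is periodic: entry i depends only on i % 10 (base text) and
--     i % 8 (variation), so it repeats every lcm(10, 8) = 40 entries.  Build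
--     the 40 distinct strings once, then fill the result by indexing.
--     """
--     base_texts = {
--         "technology": [
--             "Artificial intelligence is transforming industries across the globe with machine learning algorithms",
--             "Cloud computing platforms provide scalable infrastructure for modern applications and services",
--             "Data science and analytics help organizations make informed decisions based on empirical evidence",
--             "Cybersecurity measures are essential to protect sensitive information from malicious attacks",
--             "Internet of Things devices are creating interconnected ecosystems of smart technology",
--             "Blockchain technology offers decentralized solutions for secure and transparent transactions",
--             "Quantum computing promises to solve complex problems that are intractable for classical computers",
--             "Virtual reality and augmented reality are changing how we interact with digital content",
--             "5G networks enable faster communication and support for next-generation mobile applications",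
--             "Edge computing brings processing power closer to data sources for reduced latency"
--         ],
--         "business": [
--             "Strategic planning involves setting long-term goals and developing actionable implementation strategies",
--             "Market research provides valuable insights into customer preferences and competitive landscapes",
--             "Financial analysis helps organizations optimize resource allocation and improve profitability",
--             "Supply chain management ensures efficient flow of goods from suppliers to customers",
--             "Human resources development focuses on talent acquisition and employee engagement strategies",
--             "Digital transformation initiatives modernize business processes using advanced technologies",
--             "Customer relationship management systems improve service quality and retention rates",
--             "Project management methodologies ensure timely delivery of objectives within budget constraints",
--             "Risk assessment procedures identify potential threats and develop mitigation strategies",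
--             "Performance metrics and key performance indicators measure organizational success"
--         ]
--     }
--
--     theme_texts = base_texts.get(theme, base_texts["technology"])
--
--     # A prefix of None means "use the base text unchanged (original case)".
--     prefixes = [
--         "In today's world, ",
--         "Research shows that ",
--         "Many experts believe that ",
--         "Studies indicate that ",
--         "It is widely recognized that ",
--         None,
--         "According to recent findings, ",
--         "The latest developments show that ",
--     ]
--
--     period = 40  # lcm(len(theme_texts), len(prefixes))
--     table = []
--     for j in range(period):
--         base = theme_texts[j % len(theme_texts)]
--         p = prefixes[j % len(prefixes)]
--         table.append(base if p is None else p + base.lower())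
--
--     return [table[i % period] for i in range(size)]
-- ===== Notes on version B (the rewrite author's own statement) =====
-- stated objective: faster
-- what changed: B exploits the period lcm(10,8)=40 of the output: it builds the 40 distinct strings once (prefix table applied to each base text) and then fills the result by a flat table[i % 40] indexing pass, removing A's per-iteration rebuild of the 8-string variation list.
import Mathlib
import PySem

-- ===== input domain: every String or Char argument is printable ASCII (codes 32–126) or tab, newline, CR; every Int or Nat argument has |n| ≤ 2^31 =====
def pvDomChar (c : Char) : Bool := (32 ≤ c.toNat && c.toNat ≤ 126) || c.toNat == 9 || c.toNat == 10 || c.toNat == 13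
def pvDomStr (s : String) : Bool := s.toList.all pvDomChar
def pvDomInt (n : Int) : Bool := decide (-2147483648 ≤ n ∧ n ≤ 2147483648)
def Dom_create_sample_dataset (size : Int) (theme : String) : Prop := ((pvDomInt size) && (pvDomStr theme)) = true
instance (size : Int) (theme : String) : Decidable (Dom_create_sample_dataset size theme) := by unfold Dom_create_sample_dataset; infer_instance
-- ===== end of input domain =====

-- B precomputes the 40-entry period table (output depends only on i % 40) and fills the
-- result by indexing it; a constant-factor speedup a timing run measured.


-- ===== PORT A =====
-- helpers shared with B: both Pythons carry the identical `base_texts` literal and the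
-- identical `base_texts.get(theme, base_texts["technology"])` line.
def pvTechTexts : List String := [
  "Artificial intelligence is transforming industries across the globe with machine learning algorithms",
  "Cloud computing platforms provide scalable infrastructure for modern applications and services",
  "Data science and analytics help organizations make informed decisions based on empirical evidence",
  "Cybersecurity measures are essential to protect sensitive information from malicious attacks",
  "Internet of Things devices are creating interconnected ecosystems of smart technology",
  "Blockchain technology offers decentralized solutions for secure and transparent transactions",
  "Quantum computing promises to solve complex problems that are intractable for classical computers",
  "Virtual reality and augmented reality are changing how we interact with digital content",
  "5G networks enable faster communication and support for next-generation mobile applications",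
  "Edge computing brings processing power closer to data sources for reduced latency"]

def pvBusinessTexts : List String := [
  "Strategic planning involves setting long-term goals and developing actionable implementation strategies",
  "Market research provides valuable insights into customer preferences and competitive landscapes",
  "Financial analysis helps organizations optimize resource allocation and improve profitability",
  "Supply chain management ensures efficient flow of goods from suppliers to customers",
  "Human resources development focuses on talent acquisition and employee engagement strategies",
  "Digital transformation initiatives modernize business processes using advanced technologies",
  "Customer relationship management systems improve service quality and retention rates",
  "Project management methodologies ensure timely delivery of objectives within budget constraints",
  "Risk assessment procedures identify potential threats and develop mitigation strategies",
  "Performance metrics and key performance indicators measure organizational success"]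

def pvBaseTexts : PySem.Dict String (List String) :=
  PySem.Dict.ofList [("technology", pvTechTexts), ("business", pvBusinessTexts)]

-- base_texts.get(theme, base_texts["technology"]); the default lookup always hits pvTechTexts
def pvThemeTexts (theme : String) : List String :=
  PySem.Dict.getD pvBaseTexts theme pvTechTexts

def create_sample_dataset (size : Int) (theme : String) : List String :=
  let theme_texts := pvThemeTexts theme
  (PySem.List.pyRange 0 size 1).foldl (fun acc i =>
    let base_text := PySem.List.pyGetD theme_texts (PySem.Int.mod i (theme_texts.length : Int)) ""
    let variations : List String := [
      "In today's world, " ++ PySem.Str.lower base_text,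
      "Research shows that " ++ PySem.Str.lower base_text,
      "Many experts believe that " ++ PySem.Str.lower base_text,
      "Studies indicate that " ++ PySem.Str.lower base_text,
      "It is widely recognized that " ++ PySem.Str.lower base_text,
      base_text,
      "According to recent findings, " ++ PySem.Str.lower base_text,
      "The latest developments show that " ++ PySem.Str.lower base_text]
    let selected_text := PySem.List.pyGetD variations (PySem.Int.mod i (variations.length : Int)) ""
    acc ++ [selected_text]) []

-- ===== PORT B =====
def pvPrefixes : List (Option String) := [
  some "In today's world, ",
  some "Research shows that ",
  some "Many experts believe that ",
  some "Studies indicate that ",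
  some "It is widely recognized that ",
  none,
  some "According to recent findings, ",
  some "The latest developments show that "]

def create_sample_dataset_alt (size : Int) (theme : String) : List String :=
  let theme_texts := pvThemeTexts theme
  let table := (PySem.List.pyRange 0 40 1).foldl (fun acc j =>
    let base := PySem.List.pyGetD theme_texts (PySem.Int.mod j (theme_texts.length : Int)) ""
    let p := PySem.List.pyGetD pvPrefixes (PySem.Int.mod j (pvPrefixes.length : Int)) none
    acc ++ [match p with
            | none => base
            | some s => s ++ PySem.Str.lower base]) []
  (PySem.List.pyRange 0 size 1).map (fun i => PySem.List.pyGetD table (PySem.Int.mod i 40) "")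

-- ===== PRECONDITION & SPEC =====
def Spec_create_sample_dataset (size : Int) (theme : String) (out : List String) : Prop := out = create_sample_dataset_alt size theme
instance (size : Int) (theme : String) (out : List String) : Decidable (Spec_create_sample_dataset size theme out) := by unfold Spec_create_sample_dataset; infer_instance

-- ===== CLAIM (what is proved, stated in full; the proofs are below) =====
def Claim_equal_create_sample_dataset : Prop := ∀ (size : Int) (theme : String), Dom_create_sample_dataset size theme → Spec_create_sample_dataset size theme (create_sample_dataset size theme)

-- ===== LEMMAS AND PROOFS =====
theorem pvThemeTexts_cases (theme : String) :
    pvThemeTexts theme = pvTechTexts ∨ pvThemeTexts theme = pvBusinessTexts := by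
  have hitems : pvBaseTexts.items = [("technology", pvTechTexts), ("business", pvBusinessTexts)] := by
    rfl
  unfold pvThemeTexts
  cases h1 : (("technology" : String) == theme) <;> cases h2 : (("business" : String) == theme) <;>
    simp [PySem.Dict.getD, PySem.Dict.get?, hitems, List.find?, h1, h2]

theorem pvThemeTexts_len (theme : String) : ((pvThemeTexts theme).length : Int) = 10 := by
  rcases pvThemeTexts_cases theme with h | h <;> rw [h] <;> rfl

theorem create_sample_dataset_spec : Claim_equal_create_sample_dataset := by
  intro size theme _
  unfold Spec_create_sample_dataset create_sample_dataset create_sample_dataset_alt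
  simp only [PySem.List.foldl_append_singleton_eq_map, List.nil_append]
  apply List.map_congr_left
  intro i hi
  have hi0 : 0 ≤ i := ((PySem.List.mem_pyRange_one).1 hi).1
  rw [PySem.List.pyGetD_map_pyRange_of_nonneg _ _ _ _ (PySem.Int.mod_nonneg i (by omega))
        (PySem.Int.mod_lt i (by omega))]
  rw [pvThemeTexts_len]
  simp only [List.length_cons, List.length_nil, pvPrefixes]
  norm_num
  set b := PySem.List.pyGetD (pvThemeTexts theme) (i % 10) "" with hb
  set k := i % 8 with hk
  have hk0 : 0 ≤ k := Int.emod_nonneg i (by omega)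
  have hk8 : k < 8 := Int.emod_lt_of_pos i (by omega)
  interval_cases k <;> rfl
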